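-- pv_equiv track=rewrite | github.com/Deegoh/aoc2024 | src/day2/day2.py | checker2
-- ===== SOURCE A (Python) =====
-- def checker2(row, tolerence):
-- 	sign = 0
--
-- 	for i in range(len(row) - 1):
--
-- 		differ = int(row[i]) - int(row[i+1])
-- 		if sign == 0 and differ > 0:
-- 			sign = 1
-- 		if sign == 0 and differ < 0:
-- 			sign = -1
-- 		if differ > sign and sign == -1:
-- 			row.remove(row[i])
-- 			return checker2(row, tolerence + 1)
--
-- 		if differ < sign and sign == 1:
-- 			row.remove(row[i])
-- 			return checker2(row, tolerence + 1)
--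
-- 		if abs(differ) > 3 or abs(differ) < 1:
-- 			row.remove(row[i])
-- 			return checker2(row, tolerence + 1)
--
-- 	return tolerence
-- ===== SOURCE B (Python) =====
-- def _first_violation(row):
--     sign = 0
--     for a, b in zip(row, row[1:]):
--         d = int(a) - int(b)
--         if sign == 0:
--             sign = (d > 0) - (d < 0)
--         if not (1 <= sign * d <= 3):
--             return a
--     return None
--
--
-- def checker2(row, tolerence):
--     while True:
--         bad = _first_violation(row)
--         if bad is None:
--             return tolerence
--         row.remove(bad)
--         tolerence += 1
-- ===== Notes on version B (the rewrite author's own statement) =====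
-- stated objective: simpler
-- what changed: A's restart-from-scratch recursion with three sequential sign/violation checks becomes a plain removal loop driven by a value-returning scan helper over zip'd adjacent pairs, with the sign update and the three checks folded into one combined window condition 1 <= sign*d <= 3.
import Mathlib
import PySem

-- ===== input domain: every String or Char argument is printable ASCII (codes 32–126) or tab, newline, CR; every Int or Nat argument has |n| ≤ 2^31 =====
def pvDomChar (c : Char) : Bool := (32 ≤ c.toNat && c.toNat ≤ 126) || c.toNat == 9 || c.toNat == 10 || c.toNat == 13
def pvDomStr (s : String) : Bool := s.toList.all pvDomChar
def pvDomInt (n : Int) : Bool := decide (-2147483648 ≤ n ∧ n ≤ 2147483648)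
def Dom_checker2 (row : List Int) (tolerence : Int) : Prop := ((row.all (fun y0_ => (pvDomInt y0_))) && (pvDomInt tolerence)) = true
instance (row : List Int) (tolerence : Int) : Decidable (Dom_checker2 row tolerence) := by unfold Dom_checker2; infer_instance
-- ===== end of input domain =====

set_option maxHeartbeats 1000000
set_option maxRecDepth 4000


-- B replaces A's restart-from-scratch recursion by a value-returning scan helper over adjacent
-- pairs (sign folded into one combined window condition) driven by a plain removal loop
-- (objective: simpler). Both A and B mutate `row` in place via remove; the equivalence proved
-- here is about the RETURN value.

-- ===== PORT A =====
-- the `for i in range(len(row)-1)` body of A: returns the value row[i] to remove, or none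
-- the loop counter is the number of remaining iterations (row.length - 1 - i), so the
-- recursion is structural; i is the Python loop index
def checker2Scan (row : List Int) (sign : Int) (i : Nat) : Nat → Option Int
  | 0 => none
  | rem + 1 =>
    let a := (PySem.List.pyGet? row (i : Int)).getD 0
    let b := (PySem.List.pyGet? row ((i : Int) + 1)).getD 0
    let differ := a - b
    let sign1 := if sign = 0 ∧ differ > 0 then (1 : Int) else sign
    let sign2 := if sign1 = 0 ∧ differ < 0 then (-1 : Int) else sign1
    if differ > sign2 ∧ sign2 = -1 then some a
    else if differ < sign2 ∧ sign2 = 1 then some a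
    else if differ.natAbs > 3 ∨ differ.natAbs < 1 then some a
    else checker2Scan row sign2 (i + 1) rem

-- A's recursion; fuel = row.length suffices (each step removes one element and a row of
-- length ≤ 1 yields no violation), so the port returns exactly what the Python returns
def checker2Rec : Nat → List Int → Int → Int
  | 0, _, tol => tol
  | fuel + 1, row, tol =>
    match checker2Scan row 0 0 (row.length - 1) with
    | none => tol
    | some v => checker2Rec fuel ((PySem.List.remove? row v).getD row) (tol + 1)

def checker2 (row : List Int) (tolerence : Int) : Int :=
  checker2Rec row.length row tolerence

-- ===== PORT B =====
-- `_first_violation`: scan over zip(row, row[1:]) with the combined condition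
def firstViolation (sign : Int) : List Int → Option Int
  | a :: b :: rest =>
    let d := a - b
    let sign' := if sign = 0 then (if d > 0 then (1 : Int) else if d < 0 then -1 else 0) else sign
    if ¬ (1 ≤ sign' * d ∧ sign' * d ≤ 3) then some a
    else firstViolation sign' (b :: rest)
  | _ => none

-- B's `while True` removal loop, with the same sufficient fuel
def checker2AltRec : Nat → List Int → Int → Int
  | 0, _, tol => tol
  | fuel + 1, row, tol =>
    match firstViolation 0 row with
    | none => tol
    | some bad => checker2AltRec fuel ((PySem.List.remove? row bad).getD row) (tol + 1)

def checker2_alt (row : List Int) (tolerence : Int) : Int :=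
  checker2AltRec row.length row tolerence

-- ===== PRECONDITION & SPEC =====
def Spec_checker2 (row : List Int) (tolerence : Int) (out : Int) : Prop := out = checker2_alt row tolerence
instance (row : List Int) (tolerence : Int) (out : Int) : Decidable (Spec_checker2 row tolerence out) := by unfold Spec_checker2; infer_instance

-- ===== CLAIM (what is proved, stated in full; the proofs are below) =====
def Claim_equal_checker2 : Prop := ∀ (row : List Int) (tolerence : Int), Dom_checker2 row tolerence → Spec_checker2 row tolerence (checker2 row tolerence)

-- ===== LEMMAS AND PROOFS =====

theorem firstViolation_short (sign : Int) (l : List Int) (h : l.length ≤ 1) :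
    firstViolation sign l = none := by
  match l with
  | [] => rfl
  | [x] => rfl
  | x :: y :: rest => simp at h

theorem scan_eq (rem : Nat) : ∀ (row : List Int) (i : Nat) (sign : Int),
    rem = row.length - 1 - i → (sign = -1 ∨ sign = 0 ∨ sign = 1) →
    checker2Scan row sign i rem = firstViolation sign (row.drop i) := by
  induction rem with
  | zero =>
    intro row i sign hk _
    rw [checker2Scan]
    rw [firstViolation_short _ _ (by simp; omega)]
  | succ rem ih =>
    intro row i sign hk hs
    rw [checker2Scan]
    have h : i < row.length - 1 := by omega
    have hi : i < row.length := by omega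
    have hi1 : i + 1 < row.length := by omega
    have hd : row.drop i = row[i] :: row[i+1] :: row.drop (i + 2) := by
      rw [List.drop_eq_getElem_cons hi, List.drop_eq_getElem_cons hi1]
    have hd1 : row.drop (i + 1) = row[i+1] :: row.drop (i + 2) :=
      List.drop_eq_getElem_cons hi1
    have ha : (PySem.List.pyGet? row (i : Int)).getD 0 = row[i] := by
      rw [PySem.List.pyGet?_natCast, List.getElem?_eq_getElem hi]; rfl
    have hb : (PySem.List.pyGet? row ((i : Int) + 1)).getD 0 = row[i+1] := by
      rw [show ((i : Int) + 1) = ((i + 1 : Nat) : Int) by push_cast; ring,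
        PySem.List.pyGet?_natCast, List.getElem?_eq_getElem hi1]; rfl
    rw [hd, firstViolation, ← hd1]
    rw [ha, hb]
    have hih : ∀ s : Int, (s = -1 ∨ s = 0 ∨ s = 1) →
        checker2Scan row s (i + 1) rem = firstViolation s (row.drop (i + 1)) := by
      intro s hs'
      exact ih row (i + 1) s (by omega) hs'
    rcases hs with hs | hs | hs <;> subst hs <;>
      split_ifs <;>
      first
      | (apply hih; omega)
      | rfl
      | (exfalso; omega)
      | (exfalso; tauto)

theorem rec_eq (fuel : Nat) : ∀ (row : List Int) (tol : Int),
    checker2Rec fuel row tol = checker2AltRec fuel row tol := by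
  induction fuel with
  | zero => intro row tol; rfl
  | succ fuel ih =>
    intro row tol
    rw [checker2Rec, checker2AltRec]
    rw [scan_eq (row.length - 1) row 0 0 (by omega) (by omega)]
    simp only [List.drop_zero]
    cases firstViolation 0 row with
    | none => rfl
    | some v => exact ih _ _

-- ===== VERDICT (by name: the statement is the Claim_ definition above) =====
theorem checker2_spec : Claim_equal_checker2 := by
  intro row tolerence _
  unfold Spec_checker2 checker2 checker2_alt
  exact rec_eq row.length row tolerence
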